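-- pv_equiv track=rewrite | github.com/hammadbawany/whatsapp-connect | app/plugins/text_change_detector.py | infer_target_block
-- ===== SOURCE A (Python) =====
-- def infer_target_block(user_text, current_svg):
--     scores = {}
--
--     for block, value in current_svg.items():
--         if not value:
--             continue
--
--         overlap = len(
--             set(value.lower().split()) &
--             set(user_text.lower().split())
--         )
--
--         scores[block] = overlap
--
--     return max(scores, key=scores.get) if scores else None
-- ===== SOURCE B (Python) =====
-- def infer_target_block(user_text, current_svg):
--     # Inverted index: word -> blocks containing it; then count hits per block
--     # by iterating the user's words, instead of intersecting sets per block.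
--     index = {}
--     blocks = []
--     for block, value in current_svg.items():
--         if not value:
--             continue
--         blocks.append(block)
--         for w in set(value.lower().split()):
--             index.setdefault(w, []).append(block)
--     counts = {}
--     for w in set(user_text.lower().split()):
--         for b in index.get(w, []):
--             counts[b] = counts.get(b, 0) + 1
--     return max(blocks, key=lambda b: counts.get(b, 0)) if blocks else None
-- ===== Notes on version B (the rewrite author's own statement) =====
-- stated objective: faster
-- what changed: B builds an inverted index (word -> list of blocks) in one pass over the blocks and then scores by walking the user's distinct words and incrementing a per-block hit counter, instead of A's per-block set intersection that re-splits user_text for every block; the argmax is taken over the recorded block list with counts looked up.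
import Mathlib
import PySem

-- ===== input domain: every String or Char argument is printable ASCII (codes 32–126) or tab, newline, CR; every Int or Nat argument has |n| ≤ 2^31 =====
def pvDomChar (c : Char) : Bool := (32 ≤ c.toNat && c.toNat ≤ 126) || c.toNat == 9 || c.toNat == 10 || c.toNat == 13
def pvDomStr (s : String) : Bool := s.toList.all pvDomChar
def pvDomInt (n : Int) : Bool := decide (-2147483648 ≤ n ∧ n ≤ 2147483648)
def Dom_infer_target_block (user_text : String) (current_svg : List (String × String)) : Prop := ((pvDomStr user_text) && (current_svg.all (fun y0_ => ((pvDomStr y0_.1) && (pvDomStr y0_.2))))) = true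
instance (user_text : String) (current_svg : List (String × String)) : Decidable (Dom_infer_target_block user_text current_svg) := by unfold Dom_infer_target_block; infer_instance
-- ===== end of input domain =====

-- B replaces A's per-block set intersections by an inverted index (word -> blocks)
-- built in one pass, then counts hits per block by walking the user's words: faster.


-- s.lower().split()  (used by both Pythons)
def pvWords (s : String) : List String := PySem.Str.split₀ (PySem.Str.lower s)

-- ===== PORT A =====
def infer_target_block (user_text : String) (current_svg : List (String × String)) : Option String :=
  let d := PySem.Dict.ofList current_svg     -- the dict argument, as a Python dict
  -- scores = {}; for block, value in current_svg.items(): if not value: continue; scores[block] = overlap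
  let scores : PySem.Dict String Int :=
    d.items.foldl (fun scores p =>
      if p.2 = "" then scores
      else scores.insert p.1
        (PySem.Set.len (PySem.Set.inter (PySem.Set.ofList (pvWords p.2))
                                        (PySem.Set.ofList (pvWords user_text)))))
      PySem.Dict.empty
  -- max(scores, key=scores.get) if scores else None   (max? over [] is none)
  PySem.List.max? scores.keys (fun b => scores.getD b 0)

-- ===== PORT B =====
def infer_target_block_alt (user_text : String) (current_svg : List (String × String)) : Option String :=
  let d := PySem.Dict.ofList current_svg
  -- index = {}; blocks = []; for block, value: if not value: continue;
  --   blocks.append(block); for w in set(value.lower().split()): index.setdefault(w, []).append(block)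
  -- (the inner iteration over a Python set only appends to per-word lists later used
  --  as multisets, so the result does not depend on the set's iteration order)
  let st :=
    d.items.foldl (fun (st : PySem.Dict String (List String) × List String) p =>
      if p.2 = "" then st
      else ((PySem.Set.ofList (pvWords p.2)).foldl
              (fun idx w => idx.modify w [] (fun l => l ++ [p.1])) st.1,
            st.2 ++ [p.1]))
      (PySem.Dict.empty, [])
  -- counts = {}; for w in set(user_text.lower().split()): for b in index.get(w, []): counts[b] = counts.get(b, 0) + 1
  let counts : PySem.Dict String Int :=
    (PySem.Set.ofList (pvWords user_text)).foldl (fun c w =>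
        (st.1.getD w []).foldl (fun c b => c.insert b (c.getD b 0 + 1)) c)
      PySem.Dict.empty
  -- max(blocks, key=lambda b: counts.get(b, 0)) if blocks else None
  if st.2 = [] then none
  else PySem.List.max? st.2 (fun b => counts.getD b 0)

-- ===== PRECONDITION & SPEC =====
def Spec_infer_target_block (user_text : String) (current_svg : List (String × String)) (out : Option String) : Prop := out = infer_target_block_alt user_text current_svg
instance (user_text : String) (current_svg : List (String × String)) (out : Option String) : Decidable (Spec_infer_target_block user_text current_svg out) := by unfold Spec_infer_target_block; infer_instance

-- ===== CLAIM (what is proved, stated in full; the proofs are below) =====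
def Claim_equal_infer_target_block : Prop := ∀ (user_text : String) (current_svg : List (String × String)), Dom_infer_target_block user_text current_svg → Spec_infer_target_block user_text current_svg (infer_target_block user_text current_svg)

-- ===== LEMMAS AND PROOFS =====

-- the overlap score A computes for one (block, value) pair
def pvScore (user_text : String) (p : String × String) : Int :=
  PySem.Set.len (PySem.Set.inter (PySem.Set.ofList (pvWords p.2))
                                 (PySem.Set.ofList (pvWords user_text)))

-- the two loop bodies skip exactly the pairs with empty value
lemma fold_skip_eq_filter {β : Type} (l : List (String × String)) (f : β → String × String → β)
    (init : β) :
    l.foldl (fun acc p => if p.2 = "" then acc else f acc p) init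
    = (l.filter (fun p => decide (¬ p.2 = ""))).foldl f init := by
  rw [← PySem.List.foldl_ite_eq_foldl_filter (p := fun p : String × String => ¬ p.2 = "")]
  apply PySem.List.foldl_congr_mem
  intro acc p _
  by_cases h : p.2 = "" <;> simp [h]

-- |A ∩ B| as a Finset cardinality, for a Nodup A
lemma filter_mem_length_eq_card (A B : List String) (hA : A.Nodup) :
    (A.filter (fun x => decide (x ∈ B))).length = (A.toFinset ∩ B.toFinset).card := by
  rw [← List.toFinset_card_of_nodup (hA.filter _), List.toFinset_filter]
  congr 1
  rw [← Finset.filter_mem_eq_inter]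
  apply Finset.filter_congr
  intro x _
  simp

-- B's count of one block's hits among the user's distinct words = A's overlap score
lemma countP_comm_score (u : String) (p : String × String) :
    (((PySem.Set.ofList (pvWords u)).filter
        (fun w => decide (w ∈ PySem.Set.ofList (pvWords p.2)))).length : Int)
    = pvScore u p := by
  unfold pvScore
  rw [PySem.Set.len, PySem.Set.inter]
  have h1 := filter_mem_length_eq_card (PySem.Set.ofList (pvWords u))
      (PySem.Set.ofList (pvWords p.2)) (PySem.Set.nodup_ofList _)
  have h2 := filter_mem_length_eq_card (PySem.Set.ofList (pvWords p.2))
      (PySem.Set.ofList (pvWords u)) (PySem.Set.nodup_ofList _)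
  have hfc : (PySem.Set.ofList (pvWords p.2)).filter
        (fun x => (PySem.Set.ofList (pvWords u)).contains x)
      = (PySem.Set.ofList (pvWords p.2)).filter
        (fun x => decide (x ∈ PySem.Set.ofList (pvWords u))) := by
    apply List.filter_congr
    intro x _
    simp [PySem.Set.contains_eq_listContains]
  rw [hfc, h1, h2, Finset.inter_comm]

-- in a list with Nodup keys, two members with the same key are equal
lemma eq_of_fst_eq {m : List (String × String)} (hnd : (m.map Prod.fst).Nodup)
    {p q : String × String} (hp : p ∈ m) (hq : q ∈ m) (h : p.1 = q.1) : p = q := by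
  induction m with
  | nil => cases hp
  | cons a t ih =>
      rw [List.map_cons, List.nodup_cons] at hnd
      rcases List.mem_cons.1 hp with rfl | hp' <;>
        rcases List.mem_cons.1 hq with rfl | hq'
      · rfl
      · exact absurd (h ▸ List.mem_map_of_mem (f := Prod.fst) hq') hnd.1
      · exact absurd (h ▸ List.mem_map_of_mem (f := Prod.fst) hp') hnd.1
      · exact ih hnd.2 hp' hq'

-- one nodup word list appended into the index: the entry of w gains b iff w occurs
lemma inner_idx_getD (ws : List String) (hnd : ws.Nodup) (b : String)
    (d : PySem.Dict String (List String)) (w : String) :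
    (ws.foldl (fun d w' => d.modify w' [] (fun l => l ++ [b])) d).getD w []
    = d.getD w [] ++ (if w ∈ ws then [b] else []) := by
  have hmap : ws.foldl (fun d w' => d.modify w' [] (fun l => l ++ [b])) d
      = (ws.map (fun w' => (w', b))).foldl (fun d q => d.modify q.1 [] (fun l => l ++ [q.2])) d := by
    rw [List.foldl_map]
  rw [hmap, PySem.Dict.getD_foldl_modify_append, List.filter_map]
  have hcomp : ((fun q : String × String => q.1 == w) ∘ (fun w' => (w', b)))
      = (fun w' => w' == w) := rfl
  rw [hcomp, List.filter_beq, List.map_map]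
  by_cases hw : w ∈ ws
  · rw [List.count_eq_one_of_mem hnd hw]
    simp [hw]
  · rw [List.count_eq_zero_of_not_mem hw]
    simp [hw]

-- the whole index loop: entry of w = blocks (in order) whose value contains w
lemma idx_getD (w : String) :
    ∀ (m : List (String × String)) (d : PySem.Dict String (List String)),
    (m.foldl (fun idx p => (PySem.Set.ofList (pvWords p.2)).foldl
        (fun d w' => d.modify w' [] (fun l => l ++ [p.1])) idx) d).getD w []
    = d.getD w [] ++ (m.filter (fun p => decide (w ∈ PySem.Set.ofList (pvWords p.2)))).map Prod.fst := by
  intro m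
  induction m with
  | nil => intro d; simp
  | cons p t ih =>
      intro d
      rw [List.foldl_cons, ih, inner_idx_getD _ (PySem.Set.nodup_ofList _), List.filter_cons]
      by_cases hw : w ∈ PySem.Set.ofList (pvWords p.2)
      · simp [hw, List.append_assoc]
      · simp [hw]

-- the counting loop: final count of b = occurrences of b in all visited index entries
lemma counts_getD (g : String → List String) (b : String) :
    ∀ (ws : List String) (c : PySem.Dict String Int),
    (ws.foldl (fun c w => (g w).foldl (fun c b' => c.insert b' (c.getD b' 0 + 1)) c) c).getD b 0
    = c.getD b 0 + ((ws.flatMap g).count b : Int) := by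
  intro ws
  induction ws with
  | nil => intro c; simp
  | cons w t ih =>
      intro c
      rw [List.foldl_cons, ih, PySem.Dict.getD_foldl_insert_add_one, List.flatMap_cons,
        List.count_append]
      push_cast
      ring

-- first-max over a list with two key functions agreeing on it: same result
lemma max?_foldl_elim (key : String → Int) (l : List String) :
    PySem.List.max? l key
    = l.foldl (fun acc x => Option.elim acc (some x)
        (fun m => if key m < key x then some x else some m)) none := by
  unfold PySem.List.max?
  apply PySem.List.foldl_congr_mem
  intro acc x _
  cases acc <;> rfl

lemma max?_congr_mem (f g : String → Int) (l : List String)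
    (h : ∀ x ∈ l, f x = g x) : PySem.List.max? l f = PySem.List.max? l g := by
  rw [max?_foldl_elim f, max?_foldl_elim g]
  have step : ∀ (t : List String) (acc : Option String),
      (∀ x ∈ t, f x = g x) → (∀ b, acc = some b → f b = g b) →
      t.foldl (fun acc x => Option.elim acc (some x)
        (fun m => if f m < f x then some x else some m)) acc
      = t.foldl (fun acc x => Option.elim acc (some x)
        (fun m => if g m < g x then some x else some m)) acc := by
    intro t
    induction t with
    | nil => intro acc _ _; rfl
    | cons x t ih =>
        intro acc hl hacc
        have hx : f x = g x := hl x (by simp)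
        have ht : ∀ y ∈ t, f y = g y := fun y hy => hl y (by simp [hy])
        simp only [List.foldl_cons]
        cases acc with
        | none => exact ih (some x) ht (fun b hb => by cases hb; exact hx)
        | some m =>
            have hm : f m = g m := hacc m rfl
            simp only [Option.elim]
            rw [hm, hx]
            by_cases hgt : g m < g x
            · rw [if_pos hgt]
              exact ih (some x) ht (fun b hb => by cases hb; exact hx)
            · rw [if_neg hgt]
              exact ih (some m) ht (fun b hb => by cases hb; exact hm)
  exact step l none h (fun b hb => by cases hb)

theorem infer_target_block_spec : Claim_equal_infer_target_block := by
  intro user_text current_svg _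
  unfold Spec_infer_target_block infer_target_block infer_target_block_alt
  dsimp only
  set d := PySem.Dict.ofList current_svg with hd
  set m := d.items.filter (fun p => decide (¬ p.2 = "")) with hm
  set f : String × String → Int := pvScore user_text with hf
  -- both loops, as folds over the filtered item list m
  rw [fold_skip_eq_filter, fold_skip_eq_filter, ← hm]
  -- key uniqueness facts
  have hkeysd : (d.items.map Prod.fst).Nodup := PySem.Dict.nodup_keys_ofList current_svg
  have hmsub : (m.map Prod.fst).Sublist (d.items.map Prod.fst) :=
    List.Sublist.map Prod.fst (by rw [hm]; exact List.filter_sublist)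
  have hmnodup : (m.map Prod.fst).Nodup := hkeysd.sublist hmsub
  -- B's pair state splits into the index fold and the block list
  have hsplit := PySem.List.foldl_prod_mk
    (f := fun (i : PySem.Dict String (List String)) (p : String × String) =>
      (PySem.Set.ofList (pvWords p.2)).foldl
        (fun d w => d.modify w [] (fun l => l ++ [p.1])) i)
    (g := fun (l : List String) (p : String × String) => l ++ [p.1])
    m PySem.Dict.empty []
  rw [hsplit, PySem.List.foldl_append_singleton_eq_map, List.nil_append]
  set index := m.foldl (fun (i : PySem.Dict String (List String)) (p : String × String) =>
      (PySem.Set.ofList (pvWords p.2)).foldl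
        (fun d w => d.modify w [] (fun l => l ++ [p.1])) i) PySem.Dict.empty with hindex
  -- A's scores dict: items are exactly m paired with their scores
  set scores := m.foldl (fun sc p =>
      sc.insert p.1 (PySem.Set.len (PySem.Set.inter (PySem.Set.ofList (pvWords p.2))
        (PySem.Set.ofList (pvWords user_text)))))
      (PySem.Dict.empty : PySem.Dict String Int) with hscores
  have hitems : scores.items = m.map (fun p => (p.1, f p)) :=
    PySem.Dict.items_foldl_insert_fresh m Prod.fst f PySem.Dict.empty
      (fun a _ => PySem.Dict.contains_empty a.1) hmnodup
  have hkeys : scores.keys = m.map Prod.fst := by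
    show scores.items.map Prod.fst = m.map Prod.fst
    rw [hitems, List.map_map]; rfl
  have hknodup : scores.keys.Nodup := by rw [hkeys]; exact hmnodup
  have hgetA : ∀ p ∈ m, scores.getD p.1 0 = f p := by
    intro p hp
    exact PySem.Dict.getD_of_mem_items scores
      (by rw [hitems]; exact List.mem_map_of_mem hp) hknodup 0
  -- B's counts dict: final count of p.1 = A's score f p
  set counts := (PySem.Set.ofList (pvWords user_text)).foldl (fun c w =>
      (index.getD w []).foldl (fun c b => c.insert b (c.getD b 0 + 1)) c)
      (PySem.Dict.empty : PySem.Dict String Int) with hcounts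
  have hidx : ∀ w, index.getD w []
      = (m.filter (fun p => decide (w ∈ PySem.Set.ofList (pvWords p.2)))).map Prod.fst := by
    intro w
    rw [hindex, idx_getD w m PySem.Dict.empty, PySem.Dict.getD_empty, List.nil_append]
  have hgetB : ∀ p ∈ m, counts.getD p.1 0 = f p := by
    intro p hp
    rw [hcounts, counts_getD (fun w => index.getD w []) p.1
      (PySem.Set.ofList (pvWords user_text)) PySem.Dict.empty,
      PySem.Dict.getD_empty, zero_add]
    -- count of p.1 in each entry is 1 exactly when w occurs in p's value
    have hcnt : ∀ w, ((index.getD w []).count p.1 : Nat)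
        = if w ∈ PySem.Set.ofList (pvWords p.2) then 1 else 0 := by
      intro w
      rw [hidx w]
      set P := fun q : String × String => decide (w ∈ PySem.Set.ofList (pvWords q.2)) with hP
      have hsubnd : ((m.filter P).map Prod.fst).Nodup :=
        hmnodup.sublist (List.Sublist.map Prod.fst (List.filter_sublist))
      by_cases hPp : P p = true
      · have hmem : p.1 ∈ (m.filter P).map Prod.fst :=
          List.mem_map_of_mem (List.mem_filter.2 ⟨hp, hPp⟩)
        rw [List.count_eq_one_of_mem hsubnd hmem]
        simp only [hP] at hPp
        rw [if_pos (of_decide_eq_true hPp)]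
      · have hnmem : p.1 ∉ (m.filter P).map Prod.fst := by
          intro hmem
          rcases List.mem_map.1 hmem with ⟨q, hq, hq1⟩
          have hq' := List.mem_filter.1 hq
          have : q = p := eq_of_fst_eq hmnodup hq'.1 hp hq1
          exact hPp (this ▸ hq'.2)
        rw [List.count_eq_zero_of_not_mem hnmem]
        simp only [hP] at hPp
        rw [if_neg (by simpa using hPp)]
    rw [List.count_flatMap]
    have hmc : (PySem.Set.ofList (pvWords user_text)).map
          (List.count p.1 ∘ fun w => index.getD w [])
        = (PySem.Set.ofList (pvWords user_text)).map
          (fun w => if w ∈ PySem.Set.ofList (pvWords p.2) then 1 else 0) := by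
      apply List.map_congr_left
      intro w _
      exact hcnt w
    rw [hmc]
    have hsum : ∀ (L : List String),
        (L.map (fun w => if w ∈ PySem.Set.ofList (pvWords p.2) then 1 else 0)).sum
        = (L.filter (fun w => decide (w ∈ PySem.Set.ofList (pvWords p.2)))).length := by
      intro L
      induction L with
      | nil => rfl
      | cons a t ih =>
          rw [List.map_cons, List.sum_cons, List.filter_cons, ih]
          by_cases h : a ∈ PySem.Set.ofList (pvWords p.2) <;> simp [h, Nat.add_comm]
    rw [hsum]
    exact_mod_cast countP_comm_score user_text p
  -- assemble: both sides are the first-max over m.map fst of the same key function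
  dsimp only
  rw [hkeys]
  by_cases hnil : m.map Prod.fst = []
  · rw [hnil, if_pos rfl]
    rfl
  · rw [if_neg hnil]
    apply max?_congr_mem
    intro x hx
    rcases List.mem_map.1 hx with ⟨p, hp, rfl⟩
    rw [hgetA p hp, hgetB p hp]
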